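-- pv_equiv track=rewrite | github.com/dPfla0130/codingtest_Python | codingtest/202009/더 맵게.py | solution
-- ===== SOURCE A (Python) =====
-- import heapq
--
-- def solution(scoville, K):
--     answer = 0
--     heapq.heapify(scoville)
--     #정렬되어 있는 리스트에서 새로운 원소를 삽입할 때 가장 빠른 정렬 자료구조
--     #heap, priority queue
--     try:
--         while scoville[0] < K:
--             fir = heapq.heappop(scoville)
--             sec = heapq.heappop(scoville)
--             heapq.heappush(scoville, fir + sec*2)
--             answer += 1
--     except:
--         return -1
--     return answer
-- ===== SOURCE B (Python) =====
-- def _insort(s, x):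
--     # insert x into ascending-sorted s, keeping it sorted (after equals)
--     i = 0
--     while i < len(s) and s[i] <= x:
--         i += 1
--     s.insert(i, x)
--
-- def solution(scoville, K):
--     s = sorted(scoville)
--     answer = 0
--     while True:
--         if not s:
--             return -1
--         if s[0] >= K:
--             return answer
--         if len(s) < 2:
--             return -1
--         fir = s.pop(0)
--         sec = s.pop(0)
--         _insort(s, fir + sec * 2)
--         answer += 1
-- ===== Notes on version B (the rewrite author's own statement) =====
-- stated objective: alternative
-- what changed: B replaces the heap and broad try/except by a sorted ascending list maintained with an insertion step, with explicit emptiness/length checks returning -1 where A's heappop would raise.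
import Mathlib
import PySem

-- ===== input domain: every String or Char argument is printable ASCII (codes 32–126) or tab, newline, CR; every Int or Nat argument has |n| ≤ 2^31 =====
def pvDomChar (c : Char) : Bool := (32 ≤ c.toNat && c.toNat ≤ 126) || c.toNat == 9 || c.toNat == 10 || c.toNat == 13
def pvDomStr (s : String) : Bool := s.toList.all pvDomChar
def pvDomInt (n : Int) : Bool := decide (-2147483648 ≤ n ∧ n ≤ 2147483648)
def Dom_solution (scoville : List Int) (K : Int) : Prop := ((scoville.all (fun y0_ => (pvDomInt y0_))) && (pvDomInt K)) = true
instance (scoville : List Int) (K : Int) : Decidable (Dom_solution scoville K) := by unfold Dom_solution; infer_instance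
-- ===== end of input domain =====

-- B maintains a sorted ascending list with an insertion step instead of A's heap/try-except;
-- return values agree (A mutates its scoville argument in place, B does not — the claim is about the return value only).

-- ===== PORT A =====
-- The heap is modeled as the plain list of its values: heapify only rearranges the list
-- (multiset unchanged) and heappop returns the minimum value; this is exact for every value
-- the Python computes (fir, sec, the pushed sums, answer), since those depend only on the
-- multiset of heap elements. heappop on an empty heap raises, modeled by min? = none → -1
-- (the broad `except: return -1`).
def solGoA (heap : List Int) (K : Int) (ans : Int) : Int :=
  match h : heap.min? with
  | none => -1                                   -- scoville[0] / heappop raises → except → -1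
  | some m =>
    if m < K then
      let rest := heap.erase m                   -- fir = heappop(scoville)
      match h2 : rest.min? with
      | none => -1                               -- sec = heappop raises → except → -1
      | some s2 =>
        solGoA ((rest.erase s2) ++ [m + s2 * 2]) K (ans + 1)   -- heappush(fir + sec*2); answer += 1
    else ans
  termination_by heap.length
  decreasing_by
    simp only [List.length_append, List.length_cons, List.length_nil]
    have hm : m ∈ heap := List.min?_mem h
    have hs : s2 ∈ heap.erase m := List.min?_mem h2
    have h1 := List.length_erase_of_mem hm
    have h2' := List.length_erase_of_mem hs
    have hpos : 0 < heap.length := List.length_pos_of_mem hm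
    have hpos2 : 0 < (heap.erase m).length := List.length_pos_of_mem hs
    omega

def solution (scoville : List Int) (K : Int) : Int :=
  solGoA scoville K 0

-- ===== PORT B =====
-- _insort: linear scan past all elements ≤ x, then insert x there.
def insortB (s : List Int) (x : Int) : List Int :=
  match s with
  | [] => [x]
  | y :: ys => if y ≤ x then y :: insortB ys x else x :: y :: ys

theorem insortB_length (s : List Int) (x : Int) : (insortB s x).length = s.length + 1 := by
  induction s with
  | nil => simp [insortB]
  | cons y ys ih => simp only [insortB]; split <;> simp [ih]

def solGoB (s : List Int) (K : Int) (answer : Int) : Int :=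
  match s with
  | [] => -1                                     -- if not s: return -1
  | a :: rest =>
    if a ≥ K then answer                         -- if s[0] >= K: return answer
    else
      match rest with
      | [] => -1                                 -- if len(s) < 2: return -1
      | b :: rest2 =>
        solGoB (insortB rest2 (a + b * 2)) K (answer + 1)
  termination_by s.length
  decreasing_by simp [insortB_length]

def solution_alt (scoville : List Int) (K : Int) : Int :=
  solGoB (PySem.List.sorted scoville (fun x => x) false) K 0

-- ===== PRECONDITION & SPEC =====
def Spec_solution (scoville : List Int) (K : Int) (out : Int) : Prop := out = solution_alt scoville K
instance (scoville : List Int) (K : Int) (out : Int) : Decidable (Spec_solution scoville K out) := by unfold Spec_solution; infer_instance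

-- ===== CLAIM (what is proved, stated in full; the proofs are below) =====
def Claim_equal_solution : Prop := ∀ (scoville : List Int) (K : Int), Dom_solution scoville K → Spec_solution scoville K (solution scoville K)

-- ===== LEMMAS AND PROOFS =====
theorem min?_of_perm_sorted (heap : List Int) (a : Int) (rest : List Int)
    (hp : heap.Perm (a :: rest)) (hs : (a :: rest).Pairwise (· ≤ ·)) :
    heap.min? = some a := by
  have ha : a ∈ heap := hp.mem_iff.mpr (by simp)
  have hle : ∀ b ∈ heap, a ≤ b := by
    intro b hb
    have hb' : b ∈ a :: rest := hp.mem_iff.mp hb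
    rcases List.mem_cons.mp hb' with h | h
    · omega
    · exact (List.pairwise_cons.mp hs).1 b h
  exact List.min?_eq_some_iff.mpr ⟨ha, hle⟩

theorem insortB_perm (s : List Int) (x : Int) : (insortB s x).Perm (x :: s) := by
  induction s with
  | nil => simp [insortB]
  | cons y ys ih =>
    simp only [insortB]
    split
    · exact ((ih.cons y).trans (List.Perm.swap x y ys))
    · exact List.Perm.refl _

theorem insortB_pairwise (s : List Int) (x : Int) (hs : s.Pairwise (· ≤ ·)) :
    (insortB s x).Pairwise (· ≤ ·) := by
  induction s with
  | nil => simp [insortB]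
  | cons y ys ih =>
    rcases List.pairwise_cons.mp hs with ⟨hy, hys⟩
    simp only [insortB]
    split
    · rename_i hle
      refine List.pairwise_cons.mpr ⟨?_, ih hys⟩
      intro b hb
      have := (insortB_perm ys x).mem_iff.mp hb
      rcases List.mem_cons.mp this with h | h
      · omega
      · exact hy b h
    · rename_i hgt
      refine List.pairwise_cons.mpr ⟨?_, hs⟩
      intro b hb
      rcases List.mem_cons.mp hb with h | h
      · omega
      · have := hy b h; omega

theorem go_eq (n : ℕ) : ∀ (heap s : List Int) (K ans : Int),
    heap.length ≤ n → heap.Perm s → s.Pairwise (· ≤ ·) →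
    solGoA heap K ans = solGoB s K ans := by
  induction n with
  | zero =>
    intro heap s K ans hn hp _
    have : heap = [] := List.length_eq_zero_iff.mp (Nat.le_zero.mp hn)
    subst this
    have : s = [] := hp.symm.eq_nil
    subst this
    rw [solGoA.eq_def, solGoB.eq_def]
    simp
  | succ n ih =>
    intro heap s K ans hn hp hs
    cases s with
    | nil =>
      have : heap = [] := hp.eq_nil
      subst this
      rw [solGoA.eq_def, solGoB.eq_def]
      simp
    | cons a rest =>
      have hmin : heap.min? = some a := min?_of_perm_sorted heap a rest hp hs
      rw [solGoA.eq_def, solGoB.eq_def]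
      split
      · rename_i heq; rw [hmin] at heq; exact absurd heq (by simp)
      · rename_i m heq
        rw [hmin] at heq
        injection heq with heq; subst heq
        by_cases hK : a < K
        · have hK' : ¬ a ≥ K := by omega
          simp only [if_pos hK, if_neg hK']
          have hperase : (heap.erase a).Perm rest := by
            have := hp.erase a
            simpa [List.erase_cons_head] using this
          cases rest with
          | nil =>
            have hnil : heap.erase a = [] := hperase.eq_nil
            split
            · rfl
            · rename_i s2 heq2; rw [hnil] at heq2; exact absurd heq2 (by simp)
          | cons b rest2 =>
            have hstail : (b :: rest2).Pairwise (· ≤ ·) := (List.pairwise_cons.mp hs).2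
            have hmin2 : (heap.erase a).min? = some b :=
              min?_of_perm_sorted _ b rest2 hperase hstail
            split
            · rename_i heq2; rw [hmin2] at heq2; exact absurd heq2 (by simp)
            · rename_i b' heq2
              rw [hmin2] at heq2
              injection heq2 with heq2; subst heq2
              apply ih
              · have ha : a ∈ heap := List.min?_mem hmin
                have hb : b ∈ heap.erase a := List.min?_mem hmin2
                have h1 := List.length_erase_of_mem ha
                have h2 := List.length_erase_of_mem hb
                have hpos : 0 < heap.length := List.length_pos_of_mem ha
                have hpos2 : 0 < (heap.erase a).length := List.length_pos_of_mem hb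
                simp only [List.length_append, List.length_cons, List.length_nil]
                omega
              · have h1 : ((heap.erase a).erase b).Perm rest2 := by
                  have := hperase.erase b
                  simpa [List.erase_cons_head] using this
                refine List.Perm.trans ?_ (insortB_perm rest2 (a + b * 2)).symm
                exact (h1.append_right _).trans (List.perm_append_singleton _ _)
              · exact insortB_pairwise rest2 (a + b * 2) (List.pairwise_cons.mp hstail).2
        · have hK' : a ≥ K := by omega
          simp [hK, hK']

-- ===== VERDICT (by name: the statement is the Claim_ definition above) =====
theorem solution_spec : Claim_equal_solution := by
  intro scoville K _
  unfold Spec_solution solution solution_alt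
  exact go_eq scoville.length scoville _ K 0 le_rfl
    (PySem.List.sorted_perm scoville (fun x => x) false).symm
    (by simpa using PySem.List.sorted_pairwise scoville (fun x => x))
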